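-- pv_equiv track=rewrite | github.com/apurva91/btp | home/views.py | processmesh
-- ===== SOURCE A (Python) =====
-- def processmesh(meshstring):
-- 	mesh = ""
-- 	found = 0
-- 	for c in meshstring:
-- 		if c == '/':
-- 			found = 1
-- 	if found:
-- 		mesharr = meshstring.split('/')
-- 		for i in range(0,len(mesharr)-1):
-- 			mesh += mesharr[i] + ' '
-- 		return mesh
-- 	else:
-- 		return meshstring
-- ===== SOURCE B (Python) =====
-- def processmesh(meshstring):
--     if '/' in meshstring:
--         i = meshstring.rfind('/')
--         return meshstring[:i].replace('/', ' ') + ' '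
--     else:
--         return meshstring
-- ===== Notes on version B (the rewrite author's own statement) =====
-- stated objective: idiomatic
-- what changed: A's flag loop over all characters, full split into a segment list and an indexed loop re-joining all but the last piece are replaced by rfind for the last separator, a slice dropping the last segment, one replace of separators by spaces and a single appended space.
import Mathlib
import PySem

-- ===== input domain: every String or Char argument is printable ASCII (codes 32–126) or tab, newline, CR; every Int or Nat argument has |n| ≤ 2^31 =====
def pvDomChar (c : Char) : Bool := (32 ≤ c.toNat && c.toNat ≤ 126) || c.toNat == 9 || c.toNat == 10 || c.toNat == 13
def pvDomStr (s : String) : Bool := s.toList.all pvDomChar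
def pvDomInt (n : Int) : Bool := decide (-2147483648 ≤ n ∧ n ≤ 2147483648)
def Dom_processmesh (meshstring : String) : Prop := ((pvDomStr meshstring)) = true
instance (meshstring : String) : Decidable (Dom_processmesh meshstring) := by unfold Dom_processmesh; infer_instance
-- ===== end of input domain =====

-- B replaces A's flag loop + split + indexed re-join loop by rfind/slice/replace (idiomatic;
-- a timing run measured it faster by a constant factor).

-- ===== PORT A =====
def processmesh (meshstring : String) : String :=
  let found : Int := meshstring.toList.foldl (fun f c => if c = '/' then 1 else f) 0
  if found ≠ 0 then
    let mesharr := PySem.Chars.splitOn meshstring.toList ['/']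
    let mesh := (PySem.List.pyRange 0 ((mesharr.length : Int) - 1) 1).foldl
      (fun m i => m ++ PySem.List.pyGetD mesharr i [] ++ [' ']) []
    String.ofList mesh
  else meshstring

-- ===== PORT B =====
def processmesh_alt (meshstring : String) : String :=
  if PySem.Chars.isIn ['/'] meshstring.toList then
    let i := PySem.Chars.rfind meshstring.toList ['/']
    String.ofList
      (PySem.Chars.replace (PySem.Chars.slice meshstring.toList none (some i)) ['/'] [' '] ++ [' '])
  else meshstring

-- ===== PRECONDITION & SPEC =====
def Spec_processmesh (meshstring : String) (out : String) : Prop := out = processmesh_alt meshstring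
instance (meshstring : String) (out : String) : Decidable (Spec_processmesh meshstring out) := by unfold Spec_processmesh; infer_instance

-- ===== CLAIM (what is proved, stated in full; the proofs are below) =====
def Claim_equal_processmesh : Prop := ∀ (meshstring : String), Dom_processmesh meshstring → Spec_processmesh meshstring (processmesh meshstring)

-- ===== LEMMAS AND PROOFS =====

-- substitute '/' by ' ' on a single character
def pvSub (c : Char) : Char := if c = '/' then ' ' else c

-- A's flag loop computes 1 iff a '/' occurs
theorem pv_found_eq (l : List Char) (f : Int) :
    l.foldl (fun f c => if c = '/' then 1 else f) f = if '/' ∈ l then 1 else f := by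
  induction l generalizing f with
  | nil => simp
  | cons c t ih =>
    by_cases hc : c = '/'
    · simp [hc, ih]
    · have hc' : ¬('/' = c) := fun hh => hc hh.symm
      simp [hc, hc', ih]

-- B's guard is the same membership test
theorem pv_isIn_iff (l : List Char) : PySem.Chars.isIn ['/'] l = true ↔ '/' ∈ l := by
  rw [PySem.Chars.isIn_iff_infix]
  constructor
  · intro h; exact h.mem (by simp)
  · intro h
    obtain ⟨pre, suf, rfl⟩ := List.append_of_mem h
    exact ⟨pre, suf, by simp⟩

-- single-character replace is a map
theorem pv_replace_go (l acc : List Char) (fuel : Nat) (h : l.length ≤ fuel) :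
    PySem.Chars.replace.go ['/'] [' '] fuel l acc = acc.reverse ++ l.map pvSub := by
  induction l generalizing fuel acc with
  | nil => cases fuel <;> simp [PySem.Chars.replace.go]
  | cons c t ih =>
    cases fuel with
    | zero => simp at h
    | succ n =>
      by_cases hc : c = '/'
      · simp [PySem.Chars.replace.go, List.isPrefixOf, hc, pvSub,
          ih _ _ (by simpa using h)]
      · have hc' : ¬('/' = c) := fun hh => hc hh.symm
        simp [PySem.Chars.replace.go, List.isPrefixOf, hc, hc', pvSub,
          ih _ _ (by simpa using h)]

theorem pv_replace_eq (l : List Char) :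
    PySem.Chars.replace l ['/'] [' '] = l.map pvSub := by
  simpa using pv_replace_go l [] l.length le_rfl

-- reference single-character splitter
def pvSplit : List Char → List Char → List (List Char)
  | [], cur => [cur.reverse]
  | c :: t, cur => if c = '/' then cur.reverse :: pvSplit t [] else pvSplit t (c :: cur)

theorem pv_splitOn_go (l cur : List Char) (acc : List (List Char)) (fuel : Nat)
    (h : l.length ≤ fuel) :
    PySem.Chars.splitOn.go ['/'] fuel l cur acc = acc.reverse ++ pvSplit l cur := by
  induction l generalizing fuel cur acc with
  | nil => cases fuel <;> simp [PySem.Chars.splitOn.go, pvSplit]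
  | cons c t ih =>
    cases fuel with
    | zero => simp at h
    | succ n =>
      by_cases hc : c = '/'
      · simp [PySem.Chars.splitOn.go, List.isPrefixOf, hc, pvSplit,
          ih _ _ _ (by simpa using h)]
      · have hc' : ¬('/' = c) := fun hh => hc hh.symm
        simp [PySem.Chars.splitOn.go, List.isPrefixOf, hc, hc', pvSplit,
          ih _ _ _ (by simpa using h)]

theorem pv_splitOn_eq (l : List Char) :
    PySem.Chars.splitOn l ['/'] = pvSplit l [] := by
  simpa using pv_splitOn_go l [] [] (l.length + 1) (by omega)

-- core identity: joining all split pieces with a trailing space is map-with-space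
theorem pv_flat_split (l cur : List Char) :
    (pvSplit l cur).flatMap (fun p => p ++ [' ']) =
      cur.reverse ++ l.map pvSub ++ [' '] := by
  induction l generalizing cur with
  | nil => simp [pvSplit]
  | cons c t ih =>
    by_cases hc : c = '/' <;> simp [pvSplit, hc, ih, pvSub]

-- decomposition at the LAST '/'
theorem pv_last_slash (l : List Char) (h : '/' ∈ l) :
    ∃ pre suf, l = pre ++ '/' :: suf ∧ '/' ∉ suf := by
  induction l with
  | nil => simp at h
  | cons c t ih =>
    by_cases ht : '/' ∈ t
    · obtain ⟨pre, suf, rfl, hns⟩ := ih ht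
      exact ⟨c :: pre, suf, by simp, hns⟩
    · have hc : c = '/' := by
        rcases List.mem_cons.1 h with h1 | h1
        · exact h1.symm
        · exact absurd h1 ht
      exact ⟨[], t, by simp [hc], ht⟩

-- splitting at the last '/' splits the prefix and appends the suffix as last piece
theorem pv_split_append (pre suf cur : List Char) (h : '/' ∉ suf) :
    pvSplit (pre ++ '/' :: suf) cur = pvSplit pre cur ++ [suf] := by
  induction pre generalizing cur with
  | nil =>
    have : ∀ s c', '/' ∉ s → pvSplit s c' = [c'.reverse ++ s] := by
      intro s; induction s with
      | nil => simp [pvSplit]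
      | cons a b ihb =>
        intro c' hs
        have ha : a ≠ '/' := fun hh => hs (by simp [hh])
        simp [pvSplit, ha, ihb _ (fun hh => hs (by simp [hh]))]
    simp [pvSplit, this suf [] h]
  | cons c t ih =>
    by_cases hc : c = '/' <;> simp [pvSplit, hc, ih]

-- rfind with the last '/' at index pre.length
theorem pv_rfind_go (pre suf : List Char) (h : '/' ∉ suf) (j : Nat) (hj : pre.length ≤ j) :
    PySem.Chars.rfind.go (pre ++ '/' :: suf) ['/'] j = (pre.length : Int) := by
  induction j with
  | zero =>
    have hp : pre = [] := by
      cases pre with | nil => rfl | cons a b => simp at hj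
    subst hp; simp [PySem.Chars.rfind.go, List.isPrefixOf]
  | succ n ih =>
    rcases Nat.lt_or_ge pre.length (n + 1) with hlt | hge
    · -- index n+1 is past the last slash: either inside suf (not '/') or out of range
      have hpre : List.isPrefixOf ['/'] ((pre ++ '/' :: suf).drop (n + 1)) = false := by
        have hdrop : (pre ++ '/' :: suf).drop (n + 1) = suf.drop (n + 1 - (pre.length + 1)) := by
          rw [show pre ++ '/' :: suf = (pre ++ ['/']) ++ suf by simp,
            List.drop_append]
          simp
          omega
        rw [hdrop]
        cases hs : suf.drop (n + 1 - (pre.length + 1)) with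
        | nil => simp [List.isPrefixOf]
        | cons a b =>
          have ha : a ∈ suf := by
            refine List.mem_of_mem_drop (i := n + 1 - (pre.length + 1)) ?_
            rw [hs]; exact List.mem_cons_self
          have hne : ¬('/' = a) := fun hh => h (hh ▸ ha)
          simp [List.isPrefixOf, hne]
      rw [PySem.Chars.rfind.go, hpre]
      simp only [Bool.false_eq_true, if_false]
      exact ih (by omega)
    · -- n+1 = pre.length : found
      have he : n + 1 = pre.length := by omega
      have hp2 : List.isPrefixOf ['/'] ((pre ++ '/' :: suf).drop (n + 1)) = true := by
        rw [he, List.drop_append_of_le_length le_rfl]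
        simp [List.isPrefixOf]
      rw [PySem.Chars.rfind.go, hp2]
      simp [he]

theorem pv_rfind_eq (pre suf : List Char) (h : '/' ∉ suf) :
    PySem.Chars.rfind (pre ++ '/' :: suf) ['/'] = (pre.length : Int) := by
  unfold PySem.Chars.rfind
  exact pv_rfind_go pre suf h _ (by simp)

-- A's indexed loop over the split pieces equals the flatMap over all but the last piece
theorem pv_loop_eq (parts : List (List Char)) :
    (PySem.List.pyRange 0 ((parts.length : Int) - 1) 1).foldl
      (fun m i => m ++ PySem.List.pyGetD parts i [] ++ [' ']) [] =
      parts.dropLast.flatMap (fun p => p ++ [' ']) := by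
  have hlen : ((parts.length : Int) - 1) = (parts.dropLast.length : Int) ∨ parts = [] := by
    cases parts with
    | nil => right; rfl
    | cons a b => left; simp
  rcases hlen with hlen | rfl
  · rw [hlen]
    have hmain := PySem.List.foldl_pyRange_pyGetD' (xs := parts.dropLast)
      (d := []) (f := fun m p => m ++ p ++ [' ']) (init := []) (a := 0) le_rfl
    simp only [Int.toNat_zero, List.drop_zero] at hmain
    have hcongr : List.foldl (fun m i => m ++ PySem.List.pyGetD parts i [] ++ [' ']) []
        (PySem.List.pyRange 0 (parts.dropLast.length : Int)) =
        List.foldl (fun acc j => acc ++ PySem.List.pyGetD parts.dropLast j [] ++ [' ']) []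
        (PySem.List.pyRange 0 (parts.dropLast.length : Int)) := by
      apply PySem.List.foldl_congr_mem
      intro acc i hi
      have hi' := PySem.List.mem_pyRange_one.1 hi
      have h0 : 0 ≤ i := hi'.1
      have hidx : i.toNat < parts.dropLast.length := by omega
      have hidx2 : i.toNat < parts.length :=
        Nat.lt_of_lt_of_le hidx (by simp)
      rw [PySem.List.pyGetD_of_nonneg _ _ h0, PySem.List.pyGetD_of_nonneg _ _ h0,
        List.getD_eq_getElem _ _ hidx2, List.getD_eq_getElem _ _ hidx,
        List.getElem_dropLast]
    rw [hcongr, hmain, ← List.append_nil (List.flatMap _ _)]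
    rw [show (List.flatMap (fun p => p ++ [' ']) parts.dropLast ++ [] : List Char)
        = [] ++ List.flatMap (fun p => p ++ [' ']) parts.dropLast by simp]
    rw [← PySem.List.foldl_append_eq_flatMap]
    apply PySem.List.foldl_congr_mem
    intro acc x _
    simp
  · simp [PySem.List.pyRange]

-- ===== VERDICT (by name: the statement is the Claim_ definition above) =====
theorem processmesh_spec : Claim_equal_processmesh := by
  intro s _
  unfold Spec_processmesh processmesh processmesh_alt
  by_cases hmem : '/' ∈ s.toList
  · obtain ⟨pre, suf, hdec, hns⟩ := pv_last_slash s.toList hmem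
    have hfound : (s.toList.foldl (fun f c => if c = '/' then 1 else f) (0 : Int)) ≠ 0 := by
      rw [pv_found_eq]; simp [hmem]
    have hin : PySem.Chars.isIn ['/'] s.toList = true := (pv_isIn_iff _).2 hmem
    simp only [hfound, hin, ne_eq, not_false_eq_true, if_pos]
    -- A side
    rw [pv_splitOn_eq, hdec, pv_split_append _ _ _ hns, pv_loop_eq]
    rw [List.dropLast_concat, pv_flat_split]
    -- B side
    rw [pv_rfind_eq _ _ hns]
    rw [PySem.Chars.slice_eq_listSlice, PySem.List.slice_to_natCast, pv_replace_eq]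
    simp
  · have hfound : (s.toList.foldl (fun f c => if c = '/' then 1 else f) (0 : Int)) = 0 := by
      rw [pv_found_eq]; simp [hmem]
    have hin : PySem.Chars.isIn ['/'] s.toList = false := by
      rw [← Bool.not_eq_true, pv_isIn_iff]; exact hmem
    simp [hfound, hin]
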